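-- pv_equiv track=rewrite | github.com/posl/comment_recommendation | script/split_gen/4_time/en/170_C/9.py | solve
-- ===== SOURCE A (Python) =====
-- def solve(x, n, p):
--     if n == 0:
--         return x
--     if x not in p:
--         return x
--     else:
--         for i in range(1, 100):
--             if x - i not in p:
--                 return x - i
--             elif x + i not in p:
--                 return x + i
-- ===== SOURCE B (Python) =====
-- def solve(x, n, p):
--     if n == 0:
--         return x
--     cands = [x]
--     for i in range(1, 100):
--         cands += [x - i, x + i]
--     free = [c for c in cands if c not in p]
--     if not free:
--         return None
--     return min(free, key=lambda c: (abs(c - x), c))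
-- ===== Notes on version B (the rewrite author's own statement) =====
-- stated objective: alternative
-- what changed: A scans outward with early returns inside the loop; B materialises the whole candidate pool x, x-1, x+1, ..., x-99, x+99, filters out members of p, and selects by the key (abs(c-x), c), returning None when the pool is exhausted.
import Mathlib
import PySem

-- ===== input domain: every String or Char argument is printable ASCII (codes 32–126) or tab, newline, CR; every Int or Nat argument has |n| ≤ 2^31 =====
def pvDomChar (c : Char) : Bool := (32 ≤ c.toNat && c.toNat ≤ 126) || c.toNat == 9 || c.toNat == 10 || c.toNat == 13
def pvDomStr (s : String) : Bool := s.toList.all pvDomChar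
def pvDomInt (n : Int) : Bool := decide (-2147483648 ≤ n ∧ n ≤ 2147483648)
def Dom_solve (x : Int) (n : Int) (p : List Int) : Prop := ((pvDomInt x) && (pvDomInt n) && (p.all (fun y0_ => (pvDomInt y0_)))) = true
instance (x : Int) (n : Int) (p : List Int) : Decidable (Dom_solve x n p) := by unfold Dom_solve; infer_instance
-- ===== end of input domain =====

-- B replaces A's outward scan with early returns by building the full candidate
-- pool in distance order, filtering it against p and selecting by the key
-- (abs(c-x), c); same cost, alternative decomposition (no argument is mutated).

-- ===== PORT A =====
-- the 'for i in range(1, 100)' loop with its two early returns; falling off → None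
def solveLoop (x : Int) (p : List Int) : List Int → Option Int
  | [] => none
  | i :: t =>
    if !p.contains (x - i) then some (x - i)
    else if !p.contains (x + i) then some (x + i)
    else solveLoop x p t

def solve (x : Int) (n : Int) (p : List Int) : Option Int :=
  if n == 0 then some x
  else if !p.contains x then some x
  else solveLoop x p (PySem.List.pyRange 1 100 1)

-- ===== PORT B =====
-- 'if not free: return None; return min(free, key=lambda c: (abs(c - x), c))'
def selectMin (x : Int) (free : List Int) : Option Int :=
  match free with
  | [] => none
  | _ :: _ => PySem.List.min2? free (fun c => |c - x|) (fun c => c)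

def solve_alt (x : Int) (n : Int) (p : List Int) : Option Int :=
  if n == 0 then some x
  else
    let cands := (PySem.List.pyRange 1 100 1).foldl (fun acc i => acc ++ [x - i, x + i]) [x]
    let free := cands.filter (fun c => !p.contains c)
    selectMin x free

-- ===== PRECONDITION & SPEC =====
def Spec_solve (x : Int) (n : Int) (p : List Int) (out : Option Int) : Prop := out = solve_alt x n p
instance (x : Int) (n : Int) (p : List Int) (out : Option Int) : Decidable (Spec_solve x n p out) := by unfold Spec_solve; infer_instance

-- ===== CLAIM (what is proved, stated in full; the proofs are below) =====
def Claim_equal_solve : Prop := ∀ (x : Int) (n : Int) (p : List Int), Dom_solve x n p → Spec_solve x n p (solve x n p)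

-- ===== LEMMAS AND PROOFS =====

-- strict lexicographic order on the keys (|c - x|, c) used by B's min
def Rkey (x a b : Int) : Prop := |a - x| < |b - x| ∨ (|a - x| = |b - x| ∧ a < b)

lemma abs_shift (x i : Int) (hi : 0 < i) : |x - i - x| = i ∧ |x + i - x| = i := by
  constructor
  · have : x - i - x = -i := by ring
    rw [this, abs_neg, abs_of_pos hi]
  · have : x + i - x = i := by ring
    rw [this, abs_of_pos hi]

lemma flat_pairwise (x : Int) : ∀ (l : List Int), l.Pairwise (· < ·) → (∀ i ∈ l, 0 < i) →
    (l.flatMap (fun i => [x - i, x + i])).Pairwise (Rkey x)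
  | [], _, _ => by simp
  | i :: t, hpw, hpos => by
    have hi : 0 < i := hpos i (by simp)
    obtain ⟨hia, hib⟩ := abs_shift x i hi
    have hlt := (List.pairwise_cons.mp hpw).1
    have htpw := (List.pairwise_cons.mp hpw).2
    have hmem : ∀ b ∈ t.flatMap (fun j => [x - j, x + j]), i < |b - x| := by
      intro b hb
      obtain ⟨j, hj, hbj⟩ := List.mem_flatMap.mp hb
      have hij : i < j := hlt j hj
      obtain ⟨hja, hjb⟩ := abs_shift x j (lt_trans hi hij)
      simp only [List.mem_cons] at hbj
      rcases hbj with h | h | h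
      · rw [h, hja]; exact hij
      · rw [h, hjb]; exact hij
      · exact absurd h (by simp)
    simp only [List.flatMap_cons, List.cons_append, List.nil_append, List.pairwise_cons]
    refine ⟨?_, ?_, ?_⟩
    · intro b hb
      simp only [List.mem_cons] at hb
      rcases hb with h | h
      · subst h; exact Or.inr ⟨by rw [hia, hib], by omega⟩
      · exact Or.inl (by rw [hia]; exact hmem b h)
    · intro b hb
      exact Or.inl (by rw [hib]; exact hmem b hb)
    · exact flat_pairwise x t htpw (fun j hj => lt_trans hi (hlt j hj))

lemma cands_pairwise (x : Int) :
    ((PySem.List.pyRange 1 100 1).foldl (fun acc i => acc ++ [x - i, x + i]) [x]).Pairwise (Rkey x) := by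
  rw [PySem.List.foldl_append_eq_flatMap]
  simp only [List.singleton_append, List.pairwise_cons]
  refine ⟨?_, flat_pairwise x _ (PySem.List.pairwise_lt_pyRange_one 1 100)
    (fun i hi => by have := (PySem.List.mem_pyRange_one).mp hi; omega)⟩
  intro b hb
  obtain ⟨j, hj, hbj⟩ := List.mem_flatMap.mp hb
  have hjpos : 0 < j := by have := (PySem.List.mem_pyRange_one).mp hj; omega
  obtain ⟨hja, hjb⟩ := abs_shift x j hjpos
  have hx : |x - x| = 0 := by simp
  simp only [List.mem_cons] at hbj
  rcases hbj with h | h | h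
  · exact Or.inl (by rw [h, hx, hja]; exact hjpos)
  · exact Or.inl (by rw [h, hx, hjb]; exact hjpos)
  · exact absurd h (by simp)

-- B's min never replaces a head that is Rkey-below the rest of the list
lemma min2?_keep (x m : Int) : ∀ (t : List Int), (∀ y ∈ t, Rkey x m y) →
    PySem.List.min2? (m :: t) (fun c => |c - x|) (fun c => c) = some m
  | [], _ => rfl
  | y :: t, h => by
    have hy := h y (by simp)
    have hcond : (decide (|y - x| < |m - x|) || !decide (|m - x| < |y - x|) && decide (y < m)) = false := by
      rcases hy with h1 | ⟨h1, h2⟩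
      · simp [h1, lt_asymm h1]
      · simp [h1, lt_asymm h2]
    have ih := min2?_keep x m t (fun z hz => h z (by simp [hz]))
    simp only [PySem.List.min2?, List.foldl_cons] at ih ⊢
    simp only [hcond, Bool.false_eq_true, if_false]
    exact ih

lemma head_filter_eq_find {α : Type} (p : α → Bool) : ∀ (l : List α), (l.filter p).head? = l.find? p
  | [] => rfl
  | a :: l => by
    cases h : p a
    · simp [h, head_filter_eq_find p l]
    · simp [h]

-- B's select over an Rkey-sorted pool is find-first
lemma select_eq_find (x : Int) (p : List Int) (L : List Int) (h : L.Pairwise (Rkey x)) :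
    selectMin x (L.filter (fun c => !p.contains c)) = L.find? (fun c => !p.contains c) := by
  rw [← head_filter_eq_find]
  rcases hf : L.filter (fun c => !p.contains c) with _ | ⟨m, t⟩
  · rfl
  · have hpw : (m :: t).Pairwise (Rkey x) := hf ▸ h.filter _
    simp only [selectMin]
    rw [min2?_keep x m t (List.pairwise_cons.mp hpw).1]
    rfl

-- A's loop is find-first over the flattened candidate pairs
lemma solveLoop_eq_find (x : Int) (p : List Int) : ∀ (l : List Int),
    solveLoop x p l = (l.flatMap (fun i => [x - i, x + i])).find? (fun c => !p.contains c)
  | [] => rfl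
  | i :: t => by
    have e : solveLoop x p (i :: t) =
        if !p.contains (x - i) then some (x - i)
        else if !p.contains (x + i) then some (x + i)
        else solveLoop x p t := rfl
    rw [e, solveLoop_eq_find x p t]
    simp only [List.flatMap_cons, List.cons_append, List.nil_append, List.find?_cons]
    cases h1 : (!p.contains (x - i)) <;> cases h2 : (!p.contains (x + i)) <;>
      simp

-- ===== VERDICT (by name: the statement is the Claim_ definition above) =====
theorem solve_spec : Claim_equal_solve := by
  intro x n p _
  unfold Spec_solve solve solve_alt
  cases hn : (n == 0)
  · simp only [Bool.false_eq_true, if_false]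
    rw [select_eq_find x p _ (cands_pairwise x)]
    rw [PySem.List.foldl_append_eq_flatMap, List.singleton_append, List.find?_cons]
    cases hx : (!p.contains x)
    · simp only [Bool.false_eq_true, if_false]
      exact solveLoop_eq_find x p _
    · simp
  · simp
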